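-- pv_equiv track=rewrite | github.com/ipeterov/random-stuff | Диаграмма Вороного/vectorisation.py | alloc_lines
-- ===== SOURCE A (Python) =====
-- def alloc_lines(bitmap, monochrome = 0):
--     from copy import deepcopy
--     horisontal_bitmap = []
--     for x in range(len(bitmap)):
--         horisontal_bitmap.append([])
--         for y in range(len(bitmap[0])):
--             horisontal_bitmap[x].append((255,255,255))
--     vertical_bitmap = deepcopy(horisontal_bitmap)
--
--     bad_pattern = {(-1,0):(0,0,0), (0,1):(0,0,0), (1,0):(255,255,255), (1,-1):(255,255,255)}
--
--     for x in range(len(bitmap)):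
--         for y in range(len(bitmap[0])-1):
--             if bitmap[x][y] != bitmap[x][y+1]:
--                 vertical_bitmap[x][y] = (0,0,0)
--
--     for y in range(len(bitmap[0])):
--         for x in range(len(bitmap) - 1):
--             if bitmap[x][y] != bitmap[x+1][y]:
--                 horisontal_bitmap[x][y] = (0,0,0)
--
--     for x in range(len(bitmap)):
--         for y in range(len(bitmap[0])):
--             if vertical_bitmap[x][y] == (0,0,0):
--                 horisontal_bitmap[x][y] = (0,0,0)
--
--
--     for x in range(1, len(bitmap)-1):
--         for y in range(1, len(bitmap[0])-1):
--             whiten = 1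
--             for key in bad_pattern:
--                 if horisontal_bitmap[x+key[0]][y+key[1]] != bad_pattern[key]:
--                     whiten = 0
--             if whiten == 1:
--                 horisontal_bitmap[x][y] = (255,255,255)
--
--     return horisontal_bitmap
-- ===== SOURCE B (Python) =====
-- # B: closed-form per-cell recurrence instead of A's staged grid mutations.
-- # A cell is an edge iff it differs from its right or bottom neighbour; the
-- # cleanup's in-place dependency collapses to a per-column boolean recurrence
-- # whiten(x,y) = not whiten(x-1,y) and <raw edge pattern>, computed by one
-- # column-major scan over booleans; no intermediate RGB grids are mutated.
-- def alloc_lines(bitmap, monochrome=0):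
--     h, w = len(bitmap), len(bitmap[0])
--
--     def edge(x, y):
--         return ((x + 1 < h and bitmap[x][y] != bitmap[x + 1][y])
--                 or (y + 1 < w and bitmap[x][y] != bitmap[x][y + 1]))
--
--     wcols = []
--     for y in range(w):
--         col = [False]
--         prev = False
--         for x in range(1, h):
--             if 1 <= y <= w - 2 and x <= h - 2:
--                 prev = (not prev and edge(x - 1, y) and edge(x, y + 1)
--                         and not edge(x + 1, y) and not edge(x + 1, y - 1))
--             else:
--                 prev = False
--             col.append(prev)
--         wcols.append(col)
--
--     return [[(255, 255, 255) if wcols[y][x]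
--              else ((0, 0, 0) if edge(x, y) else (255, 255, 255))
--              for y in range(w)]
--             for x in range(h)]
-- ===== Notes on version B (the rewrite author's own statement) =====
-- stated objective: alternative
-- what changed: A's five passes over three mutable RGB grids (allocate, deepcopy, vertical-edge, horizontal-edge, merge, then a row-major in-place pattern cleanup) are replaced by a per-cell edge predicate plus a column-major boolean scan realising the cleanup's closed-form recurrence whiten(x,y) = not whiten(x-1,y) and <raw edge pattern>; no intermediate RGB grid is built or mutated.
import Mathlib
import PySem

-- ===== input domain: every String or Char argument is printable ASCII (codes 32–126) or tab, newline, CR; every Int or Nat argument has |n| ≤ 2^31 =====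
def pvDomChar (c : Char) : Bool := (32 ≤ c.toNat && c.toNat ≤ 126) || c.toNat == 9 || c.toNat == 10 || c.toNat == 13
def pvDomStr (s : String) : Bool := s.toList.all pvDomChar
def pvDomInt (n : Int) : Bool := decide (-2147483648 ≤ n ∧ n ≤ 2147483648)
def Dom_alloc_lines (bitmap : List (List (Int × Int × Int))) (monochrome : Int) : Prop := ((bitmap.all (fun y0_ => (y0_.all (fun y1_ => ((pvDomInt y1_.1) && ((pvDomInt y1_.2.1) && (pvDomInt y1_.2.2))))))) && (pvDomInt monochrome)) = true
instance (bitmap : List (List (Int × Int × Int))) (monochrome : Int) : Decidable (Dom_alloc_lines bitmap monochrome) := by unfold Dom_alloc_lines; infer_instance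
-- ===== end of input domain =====

-- B replaces A's five mutating grid passes by a per-cell edge predicate plus a
-- column-major boolean scan realising the closed-form cleanup recurrence
-- whiten(x,y) = ¬whiten(x-1,y) ∧ <raw edge pattern>: objective 'alternative'.

-- ===== PORT A =====
-- shared read/write helpers for an indexed grid; defaults are only reached outside Pre_
def pvGet2 (m : List (List (Int × Int × Int))) (x y : Nat) : Int × Int × Int :=
  (m.getD x []).getD y (255, 255, 255)

-- Python m[i][j] with Int indices (negative wraps); exact via PySem.List.pyGet?
def pvGet2i (m : List (List (Int × Int × Int))) (x y : Int) : Int × Int × Int :=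
  (PySem.List.pyGet? ((PySem.List.pyGet? m x).getD []) y).getD (255, 255, 255)

def pvSet2 (m : List (List (Int × Int × Int))) (x y : Nat) (v : Int × Int × Int) :
    List (List (Int × Int × Int)) :=
  m.set x ((m.getD x []).set y v)

def alloc_lines (bitmap : List (List (Int × Int × Int))) (monochrome : Int) :
    List (List (Int × Int × Int)) :=
  let h := bitmap.length
  let w := (bitmap.headD []).length        -- len(bitmap[0]); bitmap = [] is excluded by Pre_
  let horisontal0 := (List.range h).foldl (fun acc _x =>
      acc ++ [(List.range w).foldl (fun row _y => row ++ [((255 : Int), (255 : Int), (255 : Int))]) []]) []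
  let vertical0 := horisontal0             -- deepcopy
  let badPattern : List ((Int × Int) × (Int × Int × Int)) :=
    [((-1, 0), (0, 0, 0)), ((0, 1), (0, 0, 0)), ((1, 0), (255, 255, 255)), ((1, -1), (255, 255, 255))]
  let vertical := (List.range h).foldl (fun m x =>
      (List.range (w - 1)).foldl (fun m y =>
        if pvGet2 bitmap x y ≠ pvGet2 bitmap x (y + 1) then pvSet2 m x y (0, 0, 0) else m) m) vertical0
  let horisontal1 := (List.range w).foldl (fun m y =>
      (List.range (h - 1)).foldl (fun m x =>
        if pvGet2 bitmap x y ≠ pvGet2 bitmap (x + 1) y then pvSet2 m x y (0, 0, 0) else m) m) horisontal0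
  let horisontal2 := (List.range h).foldl (fun m x =>
      (List.range w).foldl (fun m y =>
        if pvGet2 vertical x y = (0, 0, 0) then pvSet2 m x y (0, 0, 0) else m) m) horisontal1
  (List.range' 1 (h - 2)).foldl (fun m (x : Nat) =>
      (List.range' 1 (w - 2)).foldl (fun m (y : Nat) =>
        let whiten : Int := badPattern.foldl (fun wq kv =>
          if pvGet2i m ((x : Int) + kv.1.1) ((y : Int) + kv.1.2) ≠ kv.2 then 0 else wq) 1
        if whiten = 1 then pvSet2 m x y (255, 255, 255) else m) m) horisontal2

-- ===== PORT B =====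
-- B's edge predicate: cell differs from its bottom or right neighbour
def pvEdgeB (bm : List (List (Int × Int × Int))) (h w : Nat) (x y : Nat) : Bool :=
  (decide (x + 1 < h) && decide (pvGet2 bm x y ≠ pvGet2 bm (x + 1) y))
    || (decide (y + 1 < w) && decide (pvGet2 bm x y ≠ pvGet2 bm x (y + 1)))

def alloc_lines_alt (bitmap : List (List (Int × Int × Int))) (monochrome : Int) :
    List (List (Int × Int × Int)) :=
  let h := bitmap.length
  let w := (bitmap.headD []).length
  let wcols := (List.range w).map (fun y =>
    ((List.range' 1 (h - 1)).foldl (fun (st : List Bool × Bool) (x : Nat) =>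
      let p := if 1 ≤ y ∧ y ≤ w - 2 ∧ x ≤ h - 2 then
          (!st.2) && pvEdgeB bitmap h w (x - 1) y && pvEdgeB bitmap h w x (y + 1)
            && !pvEdgeB bitmap h w (x + 1) y && !pvEdgeB bitmap h w (x + 1) (y - 1)
        else false
      (st.1 ++ [p], p)) ([false], false)).1)
  (List.range h).map (fun x => (List.range w).map (fun y =>
    if (wcols.getD y []).getD x false then (255, 255, 255)
    else if pvEdgeB bitmap h w x y then ((0 : Int), (0 : Int), (0 : Int)) else (255, 255, 255)))

-- ===== PRECONDITION & SPEC =====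
-- Pre_ excludes exactly the inputs where A raises IndexError: the empty bitmap (bitmap[0])
-- and bitmaps with a row shorter than row 0 (bitmap[x][y] for y < len(bitmap[0])).
def Pre_alloc_lines (bitmap : List (List (Int × Int × Int))) (monochrome : Int) : Prop :=
  bitmap ≠ [] ∧ ∀ r ∈ bitmap, (bitmap.headD []).length ≤ r.length
instance (bitmap : List (List (Int × Int × Int))) (monochrome : Int) : Decidable (Pre_alloc_lines bitmap monochrome) := by unfold Pre_alloc_lines; infer_instance

def pvWitness_alloc_lines : (List (List (Int × Int × Int))) × Int :=
  ([[(0, 0, 0), (255, 255, 255)], [(0, 0, 0), (0, 0, 0)]], 0)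

def Spec_alloc_lines (bitmap : List (List (Int × Int × Int))) (monochrome : Int) (out : List (List (Int × Int × Int))) : Prop := out = alloc_lines_alt bitmap monochrome
instance (bitmap : List (List (Int × Int × Int))) (monochrome : Int) (out : List (List (Int × Int × Int))) : Decidable (Spec_alloc_lines bitmap monochrome out) := by unfold Spec_alloc_lines; infer_instance

-- ===== CLAIM (what is proved, stated in full; the proofs are below) =====
def Claim_equal_alloc_lines : Prop := ∀ (bitmap : List (List (Int × Int × Int))) (monochrome : Int), Dom_alloc_lines bitmap monochrome → Pre_alloc_lines bitmap monochrome → Spec_alloc_lines bitmap monochrome (alloc_lines bitmap monochrome)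

-- ===== LEMMAS AND PROOFS =====

-- basic facts about the grid accessors
theorem pvSet2_length (m : List (List (Int × Int × Int))) (a b : Nat) (v : Int × Int × Int) :
    (pvSet2 m a b v).length = m.length := by
  simp [pvSet2]

theorem getD_pvSet2 (m : List (List (Int × Int × Int))) (a b : Nat) (v : Int × Int × Int) (x : Nat) :
    (pvSet2 m a b v).getD x [] =
      if x = a ∧ a < m.length then (m.getD a []).set b v else m.getD x [] := by
  simp only [pvSet2, List.getD_eq_getElem?_getD, List.getElem?_set]
  by_cases hxa : a = x
  · subst hxa
    by_cases hl : a < m.length <;> simp [hl]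
  · have hxa' : ¬ (x = a) := fun h => hxa h.symm
    simp [hxa, hxa']

theorem rowlen_pvSet2 (m : List (List (Int × Int × Int))) (a b : Nat) (v : Int × Int × Int) (x : Nat) :
    ((pvSet2 m a b v).getD x []).length = (m.getD x []).length := by
  rw [getD_pvSet2]
  by_cases h : x = a ∧ a < m.length
  · rcases h with ⟨rfl, h2⟩; simp [h2]
  · simp [h]

theorem pvGet2_pvSet2 (m : List (List (Int × Int × Int))) (a b : Nat) (v : Int × Int × Int) (x y : Nat) :
    pvGet2 (pvSet2 m a b v) x y =
      if x = a ∧ y = b ∧ a < m.length ∧ b < (m.getD a []).length then v else pvGet2 m x y := by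
  unfold pvGet2
  rw [getD_pvSet2]
  by_cases hx : x = a ∧ a < m.length
  · rcases hx with ⟨rfl, hl⟩
    simp only [hl, and_true, true_and, if_pos, List.getD_eq_getElem?_getD, List.getElem?_set]
    by_cases hy : b = y
    · subst hy
      by_cases hb : b < (m.getD x []).length
      · simp_all [List.getD_eq_getElem?_getD]
      · simp only [List.getD_eq_getElem?_getD] at hb ⊢
        simp [hb]
    · have hy' : ¬ (y = b) := fun h => hy h.symm
      simp [hy, hy']
  · have h2 : ¬ (x = a ∧ y = b ∧ a < m.length ∧ b < (m.getD a []).length) := by tauto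
    rw [if_neg hx, if_neg h2]

-- fold of conditional pvSet2 writes over a coordinate list, all writing the same value v
theorem length_foldl_set (F : Nat × Nat → Prop) [DecidablePred F] (v : Int × Int × Int) :
    ∀ (L : List (Nat × Nat)) (m : List (List (Int × Int × Int))),
      (L.foldl (fun m p => if F p then pvSet2 m p.1 p.2 v else m) m).length = m.length := by
  intro L
  induction L with
  | nil => intro m; rfl
  | cons p L ih =>
      intro m
      simp only [List.foldl_cons]
      rw [ih]
      by_cases hF : F p
      · simp [hF, pvSet2_length]
      · simp [hF]

theorem rowlen_foldl_set (F : Nat × Nat → Prop) [DecidablePred F] (v : Int × Int × Int) :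
    ∀ (L : List (Nat × Nat)) (m : List (List (Int × Int × Int))) (x : Nat),
      ((L.foldl (fun m p => if F p then pvSet2 m p.1 p.2 v else m) m).getD x []).length =
        (m.getD x []).length := by
  intro L
  induction L with
  | nil => intro m x; rfl
  | cons p L ih =>
      intro m x
      simp only [List.foldl_cons]
      rw [ih]
      by_cases hF : F p
      · rw [if_pos hF, rowlen_pvSet2]
      · rw [if_neg hF]

theorem pvGet2_foldl_set (F : Nat × Nat → Prop) [DecidablePred F] (v : Int × Int × Int) :
    ∀ (L : List (Nat × Nat)) (m : List (List (Int × Int × Int))) (x y : Nat),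
      pvGet2 (L.foldl (fun m p => if F p then pvSet2 m p.1 p.2 v else m) m) x y =
        if (x, y) ∈ L ∧ F (x, y) ∧ x < m.length ∧ y < (m.getD x []).length then v
        else pvGet2 m x y := by
  intro L
  induction L with
  | nil => intro m x y; simp
  | cons p L ih =>
      obtain ⟨a, b⟩ := p
      intro m x y
      simp only [List.foldl_cons]
      rw [ih]
      by_cases hF : F (a, b)
      · rw [if_pos hF]
        rw [pvSet2_length, rowlen_pvSet2, pvGet2_pvSet2]
        by_cases hm : (x, y) ∈ L ∧ F (x, y) ∧ x < m.length ∧ y < (m.getD x []).length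
        · rw [if_pos hm, if_pos ⟨List.mem_cons_of_mem _ hm.1, hm.2⟩]
        · rw [if_neg hm]
          by_cases hp : x = a ∧ y = b
          · obtain ⟨rfl, rfl⟩ := hp
            by_cases hb : x < m.length ∧ y < (m.getD x []).length
            · rw [if_pos ⟨rfl, rfl, hb.1, hb.2⟩,
                if_pos ⟨List.mem_cons_self, hF, hb.1, hb.2⟩]
            · have h1 : ¬ (x = x ∧ y = y ∧ x < m.length ∧ y < (m.getD x []).length) := by tauto
              have h2 : ¬ ((x, y) ∈ (x, y) :: L ∧ F (x, y) ∧ x < m.length ∧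
                  y < (m.getD x []).length) := by
                intro h
                rcases h with ⟨hmem, hFxy, hb1, hb2⟩
                exact hb ⟨hb1, hb2⟩
              rw [if_neg h1, if_neg h2]
          · have h1 : ¬ (x = a ∧ y = b ∧ a < m.length ∧ b < (m.getD a []).length) := by tauto
            have h2 : ¬ ((x, y) ∈ (a, b) :: L ∧ F (x, y) ∧ x < m.length ∧
                y < (m.getD x []).length) := by
              intro h
              rcases h with ⟨hmem, rest⟩
              rcases List.mem_cons.1 hmem with h | h
              · exact hp ⟨congrArg Prod.fst h, congrArg Prod.snd h⟩
              · exact hm ⟨h, rest⟩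
            rw [if_neg h1, if_neg h2]
      · rw [if_neg hF]
        by_cases hm : (x, y) ∈ L ∧ F (x, y) ∧ x < m.length ∧ y < (m.getD x []).length
        · rw [if_pos hm, if_pos ⟨List.mem_cons_of_mem _ hm.1, hm.2⟩]
        · rw [if_neg hm]
          by_cases hc : (x, y) ∈ (a, b) :: L ∧ F (x, y) ∧ x < m.length ∧ y < (m.getD x []).length
          · rcases hc with ⟨hmem, hFxy, hb⟩
            rcases List.mem_cons.1 hmem with h | h
            · exact absurd (h ▸ hFxy) hF
            · exact absurd ⟨h, hFxy, hb⟩ hm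
          · rw [if_neg hc]

-- a nested for-loop is the fold over the flattened coordinate list
theorem foldl_flatMap_eq {α β γ : Type} (l : List α) (g : α → List β) (f : γ → β → γ) :
    ∀ (init : γ), (l.flatMap g).foldl f init = l.foldl (fun acc a => (g a).foldl f acc) init := by
  induction l with
  | nil => intro init; rfl
  | cons a l ih => intro init; simp [List.foldl_append, ih]

theorem nested_fold_eq (n k : Nat) (t : List (List (Int × Int × Int)) → Nat → Nat → List (List (Int × Int × Int)))
    (m : List (List (Int × Int × Int))) :
    (List.range n).foldl (fun m x => (List.range k).foldl (fun m y => t m x y) m) m =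
      ((List.range n).flatMap (fun x => (List.range k).map (fun y => (x, y)))).foldl
        (fun m p => t m p.1 p.2) m := by
  rw [foldl_flatMap_eq]
  simp [List.foldl_map]

theorem mem_pairs (n k x y : Nat) :
    ((x, y) ∈ (List.range n).flatMap (fun a => (List.range k).map (fun b => (a, b)))) ↔
      x < n ∧ y < k := by
  simp [List.mem_flatMap, List.mem_map, List.mem_range, Prod.ext_iff]

theorem mem_pairs_swap (n k x y : Nat) :
    ((x, y) ∈ (List.range k).flatMap (fun b => (List.range n).map (fun a => (a, b)))) ↔
      x < n ∧ y < k := by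
  simp [List.mem_flatMap, List.mem_map, List.mem_range, Prod.ext_iff]
  tauto

-- the initial all-white matrix
theorem white_matrix (h w : Nat) :
    (List.range h).foldl (fun acc _x =>
        acc ++ [(List.range w).foldl (fun row _y => row ++ [((255 : Int), (255 : Int), (255 : Int))]) []]) [] =
      List.replicate h (List.replicate w (255, 255, 255)) := by
  have hrow : (List.range w).foldl (fun row _y => row ++ [((255 : Int), (255 : Int), (255 : Int))]) [] =
      List.replicate w (255, 255, 255) := by
    rw [PySem.List.foldl_append_singleton_eq_map (fun _ => ((255 : Int), (255 : Int), (255 : Int)))]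
    simp [List.map_const']
  rw [hrow, PySem.List.foldl_append_singleton_eq_map (fun _ => List.replicate w ((255 : Int), (255 : Int), (255 : Int)))]
  simp [List.map_const']

theorem pvGet2_replicate (h w x y : Nat) :
    pvGet2 (List.replicate h (List.replicate w ((255 : Int), (255 : Int), (255 : Int)))) x y =
      (255, 255, 255) := by
  unfold pvGet2
  simp only [List.getD_eq_getElem?_getD, List.getElem?_replicate]
  by_cases hx : x < h <;> by_cases hy : y < w <;> simp [hx, hy]

-- Int-indexed read at nonnegative cast indices is the Nat-indexed read
theorem pvGet2i_coe (m : List (List (Int × Int × Int))) (a b : Nat) :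
    pvGet2i m (a : Int) (b : Int) = pvGet2 m a b := by
  simp [pvGet2i, pvGet2, PySem.List.pyGet?_natCast, List.getD_eq_getElem?_getD]

theorem getElem_eq_pvGet2 (m : List (List (Int × Int × Int))) (x y : Nat)
    (hx : x < m.length) (hy : y < m[x].length) : m[x][y] = pvGet2 m x y := by
  simp [pvGet2, List.getD_eq_getElem?_getD, hx, hy]

-- proof-side description of B's row comprehension (used to characterise A's cleanup)
def pvCleanRow (prev cur nxt : List (Int × Int × Int)) (w : Nat) : List (Int × Int × Int) :=
  (List.range w).map (fun y =>
    if 1 ≤ y ∧ y ≤ w - 2 ∧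
        prev.getD y (255, 255, 255) = (0, 0, 0) ∧ cur.getD (y + 1) (255, 255, 255) = (0, 0, 0) ∧
        nxt.getD y (255, 255, 255) = (255, 255, 255) ∧ nxt.getD (y - 1) (255, 255, 255) = (255, 255, 255)
    then (255, 255, 255) else cur.getD y (255, 255, 255))

-- the rows A's cleanup produces, described recursively
def pvRowAt (e : List (List (Int × Int × Int))) (h w : Nat) (o : List (List (Int × Int × Int)))
    (k : Nat) : List (Int × Int × Int) :=
  if 1 ≤ k ∧ k ≤ h - 2 then pvCleanRow (o.getD (k - 1) []) (e.getD k []) (e.getD (k + 1) []) w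
  else e.getD k []

def pvRows (e : List (List (Int × Int × Int))) (h w : Nat) : Nat → List (List (Int × Int × Int))
  | 0 => []
  | k + 1 => pvRows e h w k ++ [pvRowAt e h w (pvRows e h w k) k]

theorem pvRows_length (e : List (List (Int × Int × Int))) (h w : Nat) :
    ∀ n, (pvRows e h w n).length = n := by
  intro n
  induction n with
  | zero => rfl
  | succ k ih => simp [pvRows, ih]

theorem pvRows_getD (e : List (List (Int × Int × Int))) (h w : Nat) :
    ∀ n i, i < n → (pvRows e h w n).getD i [] = pvRowAt e h w (pvRows e h w i) i := by
  intro n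
  induction n with
  | zero => intro i hi; omega
  | succ k ih =>
      intro i hi
      show (pvRows e h w k ++ [pvRowAt e h w (pvRows e h w k) k]).getD i [] = _
      rcases Nat.lt_or_ge i k with h1 | h1
      · rw [List.getD_eq_getElem?_getD, List.getElem?_append_left (by rw [pvRows_length]; exact h1),
          ← List.getD_eq_getElem?_getD]
        exact ih i h1
      · have hik : i = k := by omega
        subst hik
        have hl := pvRows_length e h w i
        rw [List.getD_eq_getElem?_getD, List.getElem?_append_right (by omega)]
        simp [hl]

theorem getD_set (l : List (List (Int × Int × Int))) (a : Nat) (r : List (Int × Int × Int)) (i : Nat) :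
    (l.set a r).getD i [] = if i = a ∧ a < l.length then r else l.getD i [] := by
  simp only [List.getD_eq_getElem?_getD, List.getElem?_set]
  by_cases hia : a = i
  · subst hia
    by_cases hl : a < l.length <;> simp [hl]
  · have hia' : ¬ (i = a) := fun hh => hia hh.symm
    simp [hia, hia']

theorem set_getD_self (l : List (List (Int × Int × Int))) (a : Nat) :
    l.set a (l.getD a []) = l := by
  apply List.ext_getElem
  · simp
  · intro i h1 h2
    rw [List.getElem_set]
    by_cases hia : a = i
    · subst hia
      simp [List.getD_eq_getElem?_getD, List.getElem?_eq_getElem h2]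
    · simp [hia]

-- the partially cleaned row x after the inner loop has processed y = 1..j
def pvPartial (m : List (List (Int × Int × Int))) (x w j : Nat) : List (Int × Int × Int) :=
  (List.range w).map (fun y =>
    if 1 ≤ y ∧ y ≤ j ∧
        (m.getD (x - 1) []).getD y (255, 255, 255) = (0, 0, 0) ∧
        (m.getD x []).getD (y + 1) (255, 255, 255) = (0, 0, 0) ∧
        (m.getD (x + 1) []).getD y (255, 255, 255) = (255, 255, 255) ∧
        (m.getD (x + 1) []).getD (y - 1) (255, 255, 255) = (255, 255, 255)
    then (255, 255, 255) else (m.getD x []).getD y (255, 255, 255))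

theorem pvPartial_cleanRow (m : List (List (Int × Int × Int))) (x w : Nat) :
    pvPartial m x w (w - 2) =
      pvCleanRow (m.getD (x - 1) []) (m.getD x []) (m.getD (x + 1) []) w := rfl

-- one inner pass of A's cleanup loop rewrites row x as pvCleanRow does
theorem inner_clean (m : List (List (Int × Int × Int))) (h w x : Nat)
    (hlen : m.length = h) (hrow : ∀ i, i < h → (m.getD i []).length = w)
    (hx1 : 1 ≤ x) (hx2 : x + 2 ≤ h) :
    (List.range' 1 (w - 2)).foldl (fun mm (y : Nat) =>
        if ((if pvGet2i mm ((x : Int) + 1) ((y : Int) + -1) ≠ ((255 : Int), (255 : Int), (255 : Int)) then (0 : Int)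
             else if pvGet2i mm ((x : Int) + 1) ((y : Int) + 0) ≠ ((255 : Int), (255 : Int), (255 : Int)) then 0
             else if pvGet2i mm ((x : Int) + 0) ((y : Int) + 1) ≠ ((0 : Int), (0 : Int), (0 : Int)) then 0
             else if pvGet2i mm ((x : Int) + -1) ((y : Int) + 0) ≠ ((0 : Int), (0 : Int), (0 : Int)) then 0 else 1) = 1)
        then pvSet2 mm x y (255, 255, 255) else mm) m =
      m.set x (pvCleanRow (m.getD (x - 1) []) (m.getD x []) (m.getD (x + 1) []) w) := by
  have hxh : x < h := by omega
  have hxm : x < m.length := by omega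
  have hrl : (m.getD x []).length = w := hrow x hxh
  have key : ∀ j, j ≤ w - 2 →
      (List.range' 1 j).foldl (fun mm (y : Nat) =>
        if ((if pvGet2i mm ((x : Int) + 1) ((y : Int) + -1) ≠ ((255 : Int), (255 : Int), (255 : Int)) then (0 : Int)
             else if pvGet2i mm ((x : Int) + 1) ((y : Int) + 0) ≠ ((255 : Int), (255 : Int), (255 : Int)) then 0
             else if pvGet2i mm ((x : Int) + 0) ((y : Int) + 1) ≠ ((0 : Int), (0 : Int), (0 : Int)) then 0
             else if pvGet2i mm ((x : Int) + -1) ((y : Int) + 0) ≠ ((0 : Int), (0 : Int), (0 : Int)) then 0 else 1) = 1)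
        then pvSet2 mm x y (255, 255, 255) else mm) m =
      m.set x (pvPartial m x w j) := by
    intro j
    induction j with
    | zero =>
        intro _
        have h0 : pvPartial m x w 0 = m.getD x [] := by
          apply List.ext_getElem
          · simp only [pvPartial, List.length_map, List.length_range]
            exact hrl.symm
          · intro i h1 h2
            simp only [pvPartial, List.getElem_map, List.getElem_range]
            rw [if_neg (by omega)]
            simp only [List.getD_eq_getElem?_getD] at h2 ⊢
            simp [List.getElem?_eq_getElem h2]
        rw [show List.range' 1 0 = [] from rfl]
        rw [List.foldl_nil, h0, set_getD_self]
    | succ j ihj =>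
        intro hj
        have hj' : j ≤ w - 2 := by omega
        have hw3 : 3 ≤ w := by omega
        rw [show List.range' 1 (j + 1) = List.range' 1 j ++ [1 + j] by
          simpa using List.range'_concat (s := 1) (n := j) (step := 1)]
        rw [List.foldl_append, ihj hj']
        simp only [List.foldl_cons, List.foldl_nil]
        have e1 : ((x : Int) + -1) = (((x - 1 : Nat)) : Int) := by omega
        have e2 : (((1 + j : Nat)) : Int) + 0 = (((1 + j : Nat)) : Int) := by omega
        have e3 : ((x : Int) + 0) = ((x : Nat) : Int) := by omega
        have e4 : (((1 + j : Nat)) : Int) + 1 = (((1 + j + 1 : Nat)) : Int) := by omega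
        have e5 : ((x : Int) + 1) = (((x + 1 : Nat)) : Int) := by omega
        have e6 : (((1 + j : Nat)) : Int) + -1 = ((j : Nat) : Int) := by omega
        have hmx : (m.set x (pvPartial m x w j)).getD x [] = pvPartial m x w j := by
          rw [getD_set, if_pos ⟨rfl, hxm⟩]
        have hmx1 : (m.set x (pvPartial m x w j)).getD (x - 1) [] = m.getD (x - 1) [] := by
          rw [getD_set, if_neg (by omega)]
        have hmx2 : (m.set x (pvPartial m x w j)).getD (x + 1) [] = m.getD (x + 1) [] := by
          rw [getD_set, if_neg (by omega)]
        have r1 : pvGet2i (m.set x (pvPartial m x w j)) ((x : Int) + -1) (((1 + j : Nat) : Int) + 0) =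
            (m.getD (x - 1) []).getD (1 + j) (255, 255, 255) := by
          rw [e1, e2, pvGet2i_coe]; unfold pvGet2; rw [hmx1]
        have r2 : pvGet2i (m.set x (pvPartial m x w j)) ((x : Int) + 0) (((1 + j : Nat) : Int) + 1) =
            (m.getD x []).getD (1 + j + 1) (255, 255, 255) := by
          rw [e3, e4, pvGet2i_coe]; unfold pvGet2; rw [hmx]
          rw [pvPartial, PySem.List.getD_map_range _ _ _ _ (by omega)]
          rw [if_neg (by rintro ⟨_, hle, _⟩; omega)]
        have r3 : pvGet2i (m.set x (pvPartial m x w j)) ((x : Int) + 1) (((1 + j : Nat) : Int) + 0) =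
            (m.getD (x + 1) []).getD (1 + j) (255, 255, 255) := by
          rw [e5, e2, pvGet2i_coe]; unfold pvGet2; rw [hmx2]
        have r4 : pvGet2i (m.set x (pvPartial m x w j)) ((x : Int) + 1) (((1 + j : Nat) : Int) + -1) =
            (m.getD (x + 1) []).getD j (255, 255, 255) := by
          rw [e5, e6, pvGet2i_coe]; unfold pvGet2; rw [hmx2]
        simp only [r1, r2, r3, r4]
        set P1 := (m.getD (x - 1) []).getD (1 + j) ((255 : Int), (255 : Int), (255 : Int)) with hP1
        set P2 := (m.getD x []).getD (1 + j + 1) ((255 : Int), (255 : Int), (255 : Int)) with hP2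
        set P3 := (m.getD (x + 1) []).getD (1 + j) ((255 : Int), (255 : Int), (255 : Int)) with hP3
        set P4 := (m.getD (x + 1) []).getD j ((255 : Int), (255 : Int), (255 : Int)) with hP4
        have hiff : ((if P4 ≠ (255, 255, 255) then (0 : Int)
            else if P3 ≠ (255, 255, 255) then 0
            else if P2 ≠ (0, 0, 0) then 0
            else if P1 ≠ (0, 0, 0) then 0 else 1) = 1) ↔
            (P1 = (0, 0, 0) ∧ P2 = (0, 0, 0) ∧ P3 = (255, 255, 255) ∧ P4 = (255, 255, 255)) := by
          by_cases h1 : P1 = (0, 0, 0) <;> by_cases h2 : P2 = (0, 0, 0) <;>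
            by_cases h3 : P3 = (255, 255, 255) <;> by_cases h4 : P4 = (255, 255, 255) <;>
            simp [h1, h2, h3, h4]
        rw [if_congr hiff rfl rfl]
        by_cases hC : P1 = (0, 0, 0) ∧ P2 = (0, 0, 0) ∧ P3 = (255, 255, 255) ∧ P4 = (255, 255, 255)
        · rw [if_pos hC]
          show (m.set x (pvPartial m x w j)).set x
              (((m.set x (pvPartial m x w j)).getD x []).set (1 + j) (255, 255, 255)) = _
          rw [hmx, List.set_set]
          congr 1
          apply List.ext_getElem
          · simp [pvPartial]
          · intro i h1 h2
            rw [List.getElem_set]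
            have hi : i < w := by simpa [pvPartial] using h2
            simp only [pvPartial, List.getElem_map, List.getElem_range]
            by_cases hij : 1 + j = i
            · rw [if_pos hij]
              rw [if_pos ?_]
              refine ⟨by omega, by omega, ?_, ?_, ?_, ?_⟩
              · rw [← hij]; exact hC.1
              · rw [← hij]; exact hC.2.1
              · rw [← hij]; exact hC.2.2.1
              · rw [← hij, show (1 : Nat) + j - 1 = j by omega]; exact hC.2.2.2
            · rw [if_neg hij]
              exact if_congr (by constructor <;> rintro ⟨a, b, c⟩ <;> exact ⟨a, by omega, c⟩) rfl rfl
        · rw [if_neg hC]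
          congr 1
          apply List.ext_getElem
          · simp [pvPartial]
          · intro i h1 h2
            simp only [pvPartial, List.getElem_map, List.getElem_range]
            by_cases hij : i = 1 + j
            · subst hij
              rw [if_neg (by rintro ⟨_, hle, _⟩; omega)]
              rw [if_neg ?_]
              rintro ⟨_, _, c1, c2, c3, c4⟩
              rw [show (1 : Nat) + j - 1 = j by omega] at c4
              exact hC ⟨c1, c2, c3, c4⟩
            · exact if_congr (by constructor <;> rintro ⟨a, b, c⟩ <;> exact ⟨a, by omega, c⟩) rfl rfl
  have := key (w - 2) le_rfl
  rw [this, pvPartial_cleanRow]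

theorem getD_of_lt (l : List (List (Int × Int × Int))) (i : Nat) (hi : i < l.length) :
    l.getD i [] = l[i] := by
  simp [List.getD_eq_getElem?_getD, List.getElem?_eq_getElem hi]

theorem pvRows_rowlen (e : List (List (Int × Int × Int))) (h w : Nat)
    (hrow : ∀ i, i < h → (e.getD i []).length = w) :
    ∀ n, n ≤ h → ∀ i, i < n → ((pvRows e h w n).getD i []).length = w := by
  intro n hn i hi
  rw [pvRows_getD e h w n i hi, pvRowAt]
  by_cases hc : 1 ≤ i ∧ i ≤ h - 2
  · rw [if_pos hc]; simp [pvCleanRow]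
  · rw [if_neg hc]; exact hrow i (by omega)

-- the matrix state of A's outer cleanup loop after the rows 1..k have been processed
def pvMix (e : List (List (Int × Int × Int))) (h w k : Nat) : List (List (Int × Int × Int)) :=
  (List.range h).map (fun i => if 1 ≤ i ∧ i ≤ k then (pvRows e h w h).getD i [] else e.getD i [])

theorem pvMix_length (e : List (List (Int × Int × Int))) (h w k : Nat) :
    (pvMix e h w k).length = h := by simp [pvMix]

theorem pvMix_getD (e : List (List (Int × Int × Int))) (h w k i : Nat) (hi : i < h) :
    (pvMix e h w k).getD i [] =
      if 1 ≤ i ∧ i ≤ k then (pvRows e h w h).getD i [] else e.getD i [] := by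
  rw [pvMix, PySem.List.getD_map_range _ _ _ _ hi]

theorem pvMix_getD_R (e : List (List (Int × Int × Int))) (h w k i : Nat) (hi : i < h)
    (hik : i ≤ k) : (pvMix e h w k).getD i [] = (pvRows e h w h).getD i [] := by
  rw [pvMix_getD e h w k i hi]
  by_cases h1 : 1 ≤ i
  · rw [if_pos ⟨h1, hik⟩]
  · have hi0 : i = 0 := by omega
    subst hi0
    rw [if_neg (by omega), pvRows_getD e h w h 0 (by omega), pvRowAt, if_neg (by omega)]

theorem pvMix_rowlen (e : List (List (Int × Int × Int))) (h w k : Nat)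
    (hrow : ∀ i, i < h → (e.getD i []).length = w) :
    ∀ i, i < h → ((pvMix e h w k).getD i []).length = w := by
  intro i hi
  rw [pvMix_getD e h w k i hi]
  by_cases hc : 1 ≤ i ∧ i ≤ k
  · rw [if_pos hc]; exact pvRows_rowlen e h w hrow h le_rfl i hi
  · rw [if_neg hc]; exact hrow i hi

theorem pvMix_zero (e : List (List (Int × Int × Int))) (h w : Nat) (hlen : e.length = h) :
    pvMix e h w 0 = e := by
  apply List.ext_getElem
  · simp [pvMix, hlen]
  · intro i h1 h2
    have hi : i < h := by simpa [pvMix] using h1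
    simp only [pvMix, List.getElem_map, List.getElem_range]
    rw [if_neg (by omega)]
    exact (getD_of_lt e i h2).symm ▸ (getD_of_lt e i h2)

-- A's whole cleanup phase equals the recursive row description pvRows
theorem cleanup_eq (e : List (List (Int × Int × Int))) (h w : Nat)
    (hlen : e.length = h) (hrow : ∀ i, i < h → (e.getD i []).length = w) :
    (List.range' 1 (h - 2)).foldl (fun m (x : Nat) =>
      (List.range' 1 (w - 2)).foldl (fun mm (y : Nat) =>
        if ((if pvGet2i mm ((x : Int) + 1) ((y : Int) + -1) ≠ ((255 : Int), (255 : Int), (255 : Int)) then (0 : Int)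
             else if pvGet2i mm ((x : Int) + 1) ((y : Int) + 0) ≠ ((255 : Int), (255 : Int), (255 : Int)) then 0
             else if pvGet2i mm ((x : Int) + 0) ((y : Int) + 1) ≠ ((0 : Int), (0 : Int), (0 : Int)) then 0
             else if pvGet2i mm ((x : Int) + -1) ((y : Int) + 0) ≠ ((0 : Int), (0 : Int), (0 : Int)) then 0 else 1) = 1)
        then pvSet2 mm x y (255, 255, 255) else mm) m) e = pvRows e h w h := by
  have hmix : ∀ k, k ≤ h - 2 →
      (List.range' 1 k).foldl (fun m (x : Nat) =>
        (List.range' 1 (w - 2)).foldl (fun mm (y : Nat) =>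
        if ((if pvGet2i mm ((x : Int) + 1) ((y : Int) + -1) ≠ ((255 : Int), (255 : Int), (255 : Int)) then (0 : Int)
             else if pvGet2i mm ((x : Int) + 1) ((y : Int) + 0) ≠ ((255 : Int), (255 : Int), (255 : Int)) then 0
             else if pvGet2i mm ((x : Int) + 0) ((y : Int) + 1) ≠ ((0 : Int), (0 : Int), (0 : Int)) then 0
             else if pvGet2i mm ((x : Int) + -1) ((y : Int) + 0) ≠ ((0 : Int), (0 : Int), (0 : Int)) then 0 else 1) = 1)
        then pvSet2 mm x y (255, 255, 255) else mm) m) e = pvMix e h w k := by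
    intro k
    induction k with
    | zero =>
        intro _
        rw [show List.range' 1 0 = [] from rfl, List.foldl_nil, pvMix_zero e h w hlen]
    | succ k ihk =>
        intro hk
        have hk' : k ≤ h - 2 := by omega
        rw [show List.range' 1 (k + 1) = List.range' 1 k ++ [1 + k] by
          simpa using List.range'_concat (s := 1) (n := k) (step := 1)]
        rw [List.foldl_append, ihk hk']
        simp only [List.foldl_cons, List.foldl_nil]
        rw [inner_clean (pvMix e h w k) h w (1 + k) (pvMix_length e h w k)
          (pvMix_rowlen e h w k hrow) (by omega) (by omega)]
        rw [show 1 + k - 1 = k from by omega]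
        rw [pvMix_getD_R e h w k k (by omega) le_rfl]
        rw [pvMix_getD e h w k (1 + k) (by omega), if_neg (by omega)]
        rw [pvMix_getD e h w k (1 + k + 1) (by omega), if_neg (by omega)]
        apply List.ext_getElem
        · simp [pvMix]
        · intro i h1 h2
          have hi : i < h := by simpa [pvMix] using h2
          rw [List.getElem_set]
          simp only [pvMix, List.getElem_map, List.getElem_range]
          by_cases hik : 1 + k = i
          · rw [if_pos hik, if_pos (by omega)]
            rw [← hik]
            rw [pvRows_getD e h w h (1 + k) (by omega), pvRowAt, if_pos (by omega)]
            rw [show 1 + k - 1 = k from by omega]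
            rw [pvRows_getD e h w (1 + k) k (by omega)]
            rw [← pvRows_getD e h w h k (by omega)]
          · rw [if_neg hik]
            exact if_congr (by constructor <;> rintro ⟨a, b⟩ <;> exact ⟨a, by omega⟩) rfl rfl
  rw [hmix (h - 2) le_rfl]
  apply List.ext_getElem
  · simp [pvMix, pvRows_length]
  · intro i h1 h2
    have hi : i < h := by simpa [pvMix] using h1
    simp only [pvMix, List.getElem_map, List.getElem_range]
    rw [← getD_of_lt (pvRows e h w h) i (by rw [pvRows_length]; exact hi)]
    by_cases hc : 1 ≤ i ∧ i ≤ h - 2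
    · rw [if_pos hc]
    · rw [if_neg hc]
      rw [pvRows_getD e h w h i hi, pvRowAt, if_neg (by omega)]

theorem nested_fold_eq' (n k : Nat)
    (t : List (List (Int × Int × Int)) → Nat → Nat → List (List (Int × Int × Int)))
    (m : List (List (Int × Int × Int))) :
    (List.range k).foldl (fun m y => (List.range n).foldl (fun m x => t m x y) m) m =
      ((List.range k).flatMap (fun b => (List.range n).map (fun a => (a, b)))).foldl
        (fun m p => t m p.1 p.2) m := by
  rw [foldl_flatMap_eq]
  simp [List.foldl_map]

theorem getD_replicate_row (h w x : Nat) :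
    ((List.replicate h (List.replicate w ((255 : Int), (255 : Int), (255 : Int)))).getD x []).length =
      if x < h then w else 0 := by
  by_cases hx : x < h <;> simp [List.getD_eq_getElem?_getD, hx]

theorem pass1_get (h w : Nat) (dV : Nat → Nat → Prop) [iV : ∀ x y, Decidable (dV x y)]
    (x y : Nat) (hx : x < h) (hy : y < w) :
    pvGet2 ((List.range h).foldl (fun m (x : Nat) =>
        (List.range (w - 1)).foldl (fun m (y : Nat) =>
          if dV x y then pvSet2 m x y (0, 0, 0) else m) m)
        (List.replicate h (List.replicate w (255, 255, 255)))) x y =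
      if y < w - 1 ∧ dV x y then (0, 0, 0) else (255, 255, 255) := by
  rw [nested_fold_eq, pvGet2_foldl_set (fun p => dV p.1 p.2) (0, 0, 0), pvGet2_replicate]
  refine if_congr ?_ rfl rfl
  rw [mem_pairs]
  simp only [List.length_replicate, getD_replicate_row]
  constructor
  · rintro ⟨⟨_, hyw⟩, hdv, _, _⟩; exact ⟨hyw, hdv⟩
  · rintro ⟨hyw, hdv⟩
    exact ⟨⟨hx, hyw⟩, hdv, hx, by simp [hx, hy]⟩

theorem pass2_get (h w : Nat) (dH : Nat → Nat → Prop) [iH : ∀ x y, Decidable (dH x y)]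
    (x y : Nat) (hx : x < h) (hy : y < w) :
    pvGet2 ((List.range w).foldl (fun m (y : Nat) =>
        (List.range (h - 1)).foldl (fun m (x : Nat) =>
          if dH x y then pvSet2 m x y (0, 0, 0) else m) m)
        (List.replicate h (List.replicate w (255, 255, 255)))) x y =
      if x < h - 1 ∧ dH x y then (0, 0, 0) else (255, 255, 255) := by
  rw [nested_fold_eq', pvGet2_foldl_set (fun p => dH p.1 p.2) (0, 0, 0), pvGet2_replicate]
  refine if_congr ?_ rfl rfl
  rw [mem_pairs_swap]
  simp only [List.length_replicate, getD_replicate_row]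
  constructor
  · rintro ⟨⟨hxh, _⟩, hdh, _, _⟩; exact ⟨hxh, hdh⟩
  · rintro ⟨hxh, hdh⟩
    exact ⟨⟨hxh, hy⟩, hdh, hx, by simp [hx, hy]⟩

-- A's three edge passes produce exactly the fused edge matrix
theorem merged_eq (h w : Nat) (dV dH : Nat → Nat → Prop)
    [iV : ∀ x y, Decidable (dV x y)] [iH : ∀ x y, Decidable (dH x y)] :
    (List.range h).foldl (fun m (x : Nat) =>
      (List.range w).foldl (fun m (y : Nat) =>
        if pvGet2 ((List.range h).foldl (fun m (x : Nat) =>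
              (List.range (w - 1)).foldl (fun m (y : Nat) =>
                if dV x y then pvSet2 m x y (0, 0, 0) else m) m)
              (List.replicate h (List.replicate w (255, 255, 255)))) x y = (0, 0, 0)
        then pvSet2 m x y (0, 0, 0) else m) m)
      ((List.range w).foldl (fun m (y : Nat) =>
        (List.range (h - 1)).foldl (fun m (x : Nat) =>
          if dH x y then pvSet2 m x y (0, 0, 0) else m) m)
        (List.replicate h (List.replicate w (255, 255, 255)))) =
    (List.range h).map (fun x => (List.range w).map (fun y =>
      if (x + 1 < h ∧ dH x y) ∨ (y + 1 < w ∧ dV x y)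
      then ((0 : Int), (0 : Int), (0 : Int)) else (255, 255, 255))) := by
  have hH1len : ((List.range w).foldl (fun m (y : Nat) =>
      (List.range (h - 1)).foldl (fun m (x : Nat) =>
        if dH x y then pvSet2 m x y (0, 0, 0) else m) m)
      (List.replicate h (List.replicate w (255, 255, 255)))).length = h := by
    rw [nested_fold_eq', length_foldl_set (fun p => dH p.1 p.2) (0, 0, 0)]
    simp
  have hH1row : ∀ x : Nat, (((List.range w).foldl (fun m (y : Nat) =>
      (List.range (h - 1)).foldl (fun m (x : Nat) =>
        if dH x y then pvSet2 m x y (0, 0, 0) else m) m)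
      (List.replicate h (List.replicate w (255, 255, 255)))).getD x []).length =
      if x < h then w else 0 := by
    intro x
    rw [nested_fold_eq', rowlen_foldl_set (fun p => dH p.1 p.2) (0, 0, 0), getD_replicate_row]
  apply List.ext_getElem
  · rw [nested_fold_eq, length_foldl_set (fun p =>
      pvGet2 ((List.range h).foldl (fun m (x : Nat) =>
        (List.range (w - 1)).foldl (fun m (y : Nat) =>
          if dV x y then pvSet2 m x y (0, 0, 0) else m) m)
        (List.replicate h (List.replicate w (255, 255, 255)))) p.1 p.2 = (0, 0, 0)) (0, 0, 0)]
    rw [hH1len]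
    simp
  · intro i h1 h2
    have hmlen : _ := h1
    rw [nested_fold_eq, length_foldl_set] at hmlen
    rw [hH1len] at hmlen
    have hih : i < h := hmlen
    apply List.ext_getElem
    · rw [← getD_of_lt _ i h1, ← getD_of_lt _ i h2]
      rw [nested_fold_eq, rowlen_foldl_set, hH1row, if_pos hih]
      rw [PySem.List.getD_map_range _ _ _ _ hih]
      simp
    · intro j hj1 hj2
      have hjw : j < w := by
        have hj1' := hj1
        rw [← getD_of_lt _ i h1] at hj1'
        rw [nested_fold_eq, rowlen_foldl_set, hH1row, if_pos hih] at hj1'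
        exact hj1'
      rw [getElem_eq_pvGet2 _ i j h1 hj1]
      simp only [List.getElem_map, List.getElem_range]
      rw [nested_fold_eq, pvGet2_foldl_set (fun p =>
        pvGet2 ((List.range h).foldl (fun m (x : Nat) =>
          (List.range (w - 1)).foldl (fun m (y : Nat) =>
            if dV x y then pvSet2 m x y (0, 0, 0) else m) m)
          (List.replicate h (List.replicate w (255, 255, 255)))) p.1 p.2 = (0, 0, 0)) (0, 0, 0)]
      rw [pass1_get h w dV i j hih hjw, pass2_get h w dH i j hih hjw]
      have hcon : ((i + 1 < h ∧ dH i j) ∨ (j + 1 < w ∧ dV i j)) ↔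
          ((j < w - 1 ∧ dV i j) ∨ (i < h - 1 ∧ dH i j)) := by
        constructor
        · rintro (⟨a, b⟩ | ⟨a, b⟩)
          · exact Or.inr ⟨by omega, b⟩
          · exact Or.inl ⟨by omega, b⟩
        · rintro (⟨a, b⟩ | ⟨a, b⟩)
          · exact Or.inr ⟨by omega, b⟩
          · exact Or.inl ⟨by omega, b⟩
      rw [if_congr hcon rfl rfl]
      simp only [mem_pairs, hH1len, hH1row]
      by_cases hdv : j < w - 1 ∧ dV i j <;> by_cases hdh : i < h - 1 ∧ dH i j <;>
        simp [hdv, hdh, hih, hjw]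

-- ===== B-side lemmas: the column recurrence describes A's cleanup =====

-- the fused edge matrix, as a named definition
def pvE (bm : List (List (Int × Int × Int))) (h w : Nat) : List (List (Int × Int × Int)) :=
  (List.range h).map (fun x => (List.range w).map (fun y =>
    if (x + 1 < h ∧ pvGet2 bm x y ≠ pvGet2 bm (x + 1) y) ∨
       (y + 1 < w ∧ pvGet2 bm x y ≠ pvGet2 bm x (y + 1))
    then ((0 : Int), (0 : Int), (0 : Int)) else (255, 255, 255)))

theorem pvEdgeB_iff (bm : List (List (Int × Int × Int))) (h w x y : Nat) :
    pvEdgeB bm h w x y = true ↔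
      ((x + 1 < h ∧ pvGet2 bm x y ≠ pvGet2 bm (x + 1) y) ∨
       (y + 1 < w ∧ pvGet2 bm x y ≠ pvGet2 bm x (y + 1))) := by
  simp [pvEdgeB]

theorem pvE_cell (bm : List (List (Int × Int × Int))) (h w x y : Nat) (hx : x < h) (hy : y < w) :
    ((pvE bm h w).getD x []).getD y (255, 255, 255) =
      if pvEdgeB bm h w x y then ((0 : Int), (0 : Int), (0 : Int)) else (255, 255, 255) := by
  rw [pvE, PySem.List.getD_map_range _ _ _ _ hx, PySem.List.getD_map_range _ _ _ _ hy]
  exact if_congr (pvEdgeB_iff bm h w x y).symm rfl rfl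

theorem pvE_length (bm : List (List (Int × Int × Int))) (h w : Nat) : (pvE bm h w).length = h := by
  simp [pvE]

theorem pvE_rowlen (bm : List (List (Int × Int × Int))) (h w : Nat) :
    ∀ i, i < h → ((pvE bm h w).getD i []).length = w := by
  intro i hi
  rw [pvE, PySem.List.getD_map_range _ _ _ _ hi]
  simp

-- the closed-form whiten recurrence down a column
def pvWf (bm : List (List (Int × Int × Int))) (h w : Nat) : Nat → Nat → Bool
  | 0, _ => false
  | x + 1, y =>
    if 1 ≤ y ∧ y ≤ w - 2 ∧ x + 1 ≤ h - 2 then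
      (!pvWf bm h w x y) && pvEdgeB bm h w x y && pvEdgeB bm h w (x + 1) (y + 1)
        && !pvEdgeB bm h w (x + 2) y && !pvEdgeB bm h w (x + 2) (y - 1)
    else false

-- B's column scan computes exactly pvWf
theorem pvScan_eq (bm : List (List (Int × Int × Int))) (h w y : Nat) :
    ∀ k, ((List.range' 1 k).foldl (fun (st : List Bool × Bool) (x : Nat) =>
      (st.1 ++ [if 1 ≤ y ∧ y ≤ w - 2 ∧ x ≤ h - 2 then
          (!st.2) && pvEdgeB bm h w (x - 1) y && pvEdgeB bm h w x (y + 1)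
            && !pvEdgeB bm h w (x + 1) y && !pvEdgeB bm h w (x + 1) (y - 1)
        else false],
       if 1 ≤ y ∧ y ≤ w - 2 ∧ x ≤ h - 2 then
          (!st.2) && pvEdgeB bm h w (x - 1) y && pvEdgeB bm h w x (y + 1)
            && !pvEdgeB bm h w (x + 1) y && !pvEdgeB bm h w (x + 1) (y - 1)
        else false)) ([false], false)) =
    ((List.range (k + 1)).map (fun x => pvWf bm h w x y), pvWf bm h w k y) := by
  intro k
  induction k with
  | zero => rfl
  | succ k ih =>
      rw [show List.range' 1 (k + 1) = List.range' 1 k ++ [1 + k] by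
        simpa using List.range'_concat (s := 1) (n := k) (step := 1)]
      rw [List.foldl_append, ih]
      simp only [List.foldl_cons, List.foldl_nil]
      have hp : (if 1 ≤ y ∧ y ≤ w - 2 ∧ 1 + k ≤ h - 2 then
          (!pvWf bm h w k y) && pvEdgeB bm h w (1 + k - 1) y && pvEdgeB bm h w (1 + k) (y + 1)
            && !pvEdgeB bm h w (1 + k + 1) y && !pvEdgeB bm h w (1 + k + 1) (y - 1)
        else false) = pvWf bm h w (k + 1) y := by
        rw [show (1 + k - 1 : Nat) = k by omega, show (1 + k : Nat) = k + 1 by omega,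
          show (k + 1 + 1 : Nat) = k + 2 by omega]
        rfl
      simp only [hp]
      simp [List.range_succ]

-- the cell produced by A's cleanup is pvWf-whitening over the raw edge map
theorem pvRows_cell (bm : List (List (Int × Int × Int))) (h w : Nat) :
    ∀ x, x < h → ∀ y, y < w →
      ((pvRows (pvE bm h w) h w h).getD x []).getD y (255, 255, 255) =
        if pvWf bm h w x y then (255, 255, 255)
        else if pvEdgeB bm h w x y then ((0 : Int), (0 : Int), (0 : Int)) else (255, 255, 255) := by
  intro x
  induction x with
  | zero =>
      intro _ y hy
      rw [pvRows_getD _ h w h 0 (by omega), pvRowAt, if_neg (by omega)]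
      rw [pvE_cell bm h w 0 y (by omega) hy]
      rfl
  | succ x ih =>
      intro hx y hy
      rw [pvRows_getD _ h w h (x + 1) hx, pvRowAt]
      by_cases hc : 1 ≤ x + 1 ∧ x + 1 ≤ h - 2
      · rw [if_pos hc]
        rw [show (x + 1 - 1 : Nat) = x from rfl]
        rw [pvRows_getD _ h w (x + 1) x (by omega)]
        rw [← pvRows_getD _ h w h x (by omega)]
        rw [pvCleanRow, PySem.List.getD_map_range _ _ _ _ hy]
        by_cases hyc : 1 ≤ y ∧ y ≤ w - 2
        · have hw3 : 3 ≤ w := by omega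
          have hh3 : 3 ≤ h := by omega
          rw [ih (by omega) y hy]
          rw [pvE_cell bm h w (x + 1) (y + 1) (by omega) (by omega)]
          rw [pvE_cell bm h w (x + 2) y (by omega) hy]
          rw [pvE_cell bm h w (x + 2) (y - 1) (by omega) (by omega)]
          rw [pvE_cell bm h w (x + 1) y (by omega) hy]
          have hWf : pvWf bm h w (x + 1) y =
              ((!pvWf bm h w x y) && pvEdgeB bm h w x y && pvEdgeB bm h w (x + 1) (y + 1)
                && !pvEdgeB bm h w (x + 2) y && !pvEdgeB bm h w (x + 2) (y - 1)) := by
            show (if 1 ≤ y ∧ y ≤ w - 2 ∧ x + 1 ≤ h - 2 then _ else false) = _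
            rw [if_pos ⟨hyc.1, hyc.2, hc.2⟩]
          rw [hWf]
          cases hW : pvWf bm h w x y <;> cases h1 : pvEdgeB bm h w x y <;>
            cases h2 : pvEdgeB bm h w (x + 1) (y + 1) <;> cases h3 : pvEdgeB bm h w (x + 2) y <;>
            cases h4 : pvEdgeB bm h w (x + 2) (y - 1) <;>
            simp [hyc.1, hyc.2]
        · rw [if_neg (by tauto)]
          rw [pvE_cell bm h w (x + 1) y hx hy]
          have hWf : pvWf bm h w (x + 1) y = false := by
            show (if 1 ≤ y ∧ y ≤ w - 2 ∧ x + 1 ≤ h - 2 then _ else false) = false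
            rw [if_neg (by tauto)]
          rw [hWf]
          rfl
      · rw [if_neg hc]
        rw [pvE_cell bm h w (x + 1) y hx hy]
        have hWf : pvWf bm h w (x + 1) y = false := by
          show (if 1 ≤ y ∧ y ≤ w - 2 ∧ x + 1 ≤ h - 2 then _ else false) = false
          rw [if_neg (by rintro ⟨-, -, h3⟩; exact hc ⟨Nat.le_add_left 1 x, h3⟩)]
        rw [hWf]
        rfl

-- B's whiten-column entry is pvWf
theorem pvCol_cell (bm : List (List (Int × Int × Int))) (h w x y : Nat) (hx : x < h) :
    ((((List.range' 1 (h - 1)).foldl (fun (st : List Bool × Bool) (x : Nat) =>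
      (st.1 ++ [if 1 ≤ y ∧ y ≤ w - 2 ∧ x ≤ h - 2 then
          (!st.2) && pvEdgeB bm h w (x - 1) y && pvEdgeB bm h w x (y + 1)
            && !pvEdgeB bm h w (x + 1) y && !pvEdgeB bm h w (x + 1) (y - 1)
        else false],
       if 1 ≤ y ∧ y ≤ w - 2 ∧ x ≤ h - 2 then
          (!st.2) && pvEdgeB bm h w (x - 1) y && pvEdgeB bm h w x (y + 1)
            && !pvEdgeB bm h w (x + 1) y && !pvEdgeB bm h w (x + 1) (y - 1)
        else false)) ([false], false)).1).getD x false) = pvWf bm h w x y := by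
  rw [pvScan_eq bm h w y (h - 1)]
  have hh : h - 1 + 1 = h := by omega
  rw [hh, PySem.List.getD_map_range _ _ _ _ hx]

-- ===== VERDICT (by name: the statement is the Claim_ definition above) =====
theorem alloc_lines_spec : Claim_equal_alloc_lines := by
  intro bitmap monochrome _ _
  unfold Spec_alloc_lines alloc_lines alloc_lines_alt
  simp only [List.foldl_cons, List.foldl_nil]
  rw [white_matrix]
  rw [merged_eq bitmap.length (bitmap.headD []).length
      (fun x y => pvGet2 bitmap x y ≠ pvGet2 bitmap x (y + 1))
      (fun x y => pvGet2 bitmap x y ≠ pvGet2 bitmap (x + 1) y)]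
  rw [show (List.range bitmap.length).map (fun x => (List.range (bitmap.headD []).length).map (fun y =>
      if (x + 1 < bitmap.length ∧ pvGet2 bitmap x y ≠ pvGet2 bitmap (x + 1) y) ∨
         (y + 1 < (bitmap.headD []).length ∧ pvGet2 bitmap x y ≠ pvGet2 bitmap x (y + 1))
      then ((0 : Int), (0 : Int), (0 : Int)) else (255, 255, 255))) =
      pvE bitmap bitmap.length (bitmap.headD []).length from rfl]
  refine Eq.trans (cleanup_eq (pvE bitmap bitmap.length (bitmap.headD []).length)
      bitmap.length (bitmap.headD []).length
      (pvE_length bitmap bitmap.length (bitmap.headD []).length)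
      (pvE_rowlen bitmap bitmap.length (bitmap.headD []).length)) ?_
  set h := bitmap.length
  set w := (bitmap.headD []).length
  apply List.ext_getElem
  · simp [pvRows_length]
  · intro i h1 h2
    have hih : i < h := by rwa [pvRows_length] at h1
    apply List.ext_getElem
    · rw [← getD_of_lt _ i h1, ← getD_of_lt _ i h2]
      rw [pvRows_rowlen (pvE bitmap h w) h w (pvE_rowlen bitmap h w) h le_rfl i hih]
      rw [PySem.List.getD_map_range _ _ _ _ hih]
      simp
    · intro j hj1 hj2
      have hjw : j < w := by
        have := hj1
        rw [← getD_of_lt _ i h1,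
          pvRows_rowlen (pvE bitmap h w) h w (pvE_rowlen bitmap h w) h le_rfl i hih] at this
        exact this
      rw [show (pvRows (pvE bitmap h w) h w h)[i][j] =
          ((pvRows (pvE bitmap h w) h w h).getD i []).getD j (255, 255, 255) from by
        rw [getD_of_lt _ i h1, List.getD_eq_getElem?_getD, List.getElem?_eq_getElem hj1]; rfl]
      rw [pvRows_cell bitmap h w i hih j hjw]
      simp only [List.getElem_map, List.getElem_range]
      rw [PySem.List.getD_map_range _ _ _ _ hjw]
      rw [pvCol_cell bitmap h w i j hih]
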